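-- pv_equiv track=rewrite | github.com/R-D-Y/helpchmod | hchmod.py | decode_chmod
-- ===== SOURCE A (Python) =====
-- def decode_chmod(chmod_str):
--     permission_dict = {
--         "0": "---",
--         "1": "--x",
--         "2": "-w-",
--         "3": "-wx",
--         "4": "r--",
--         "5": "r-x",
--         "6": "rw-",
--         "7": "rwx"
--     }
--
--     decoded = []
--     for digit in chmod_str:
--         if digit in permission_dict:
--             decoded.append(permission_dict[digit])
--
--     return "".join(decoded)
-- ===== SOURCE B (Python) =====
-- def decode_chmod(chmod_str):
--     # staged passes: keep the octal digits, compute each permission column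
--     # separately, then interleave the three columns
--     kept = [ord(c) - 48 for c in chmod_str if '0' <= c <= '7']
--     r = ['r' if n >= 4 else '-' for n in kept]
--     w = ['w' if n % 4 >= 2 else '-' for n in kept]
--     x = ['x' if n % 2 == 1 else '-' for n in kept]
--     return ''.join(a + b + c for a, b, c in zip(r, w, x))
-- ===== Notes on version B (the rewrite author's own statement) =====
-- stated objective: alternative
-- what changed: Replaces A's single pass with a per-digit table lookup by staged column-wise passes: filter-and-convert the octal digits once, compute the r/w/x permission columns as three separate lists by arithmetic bit tests, and interleave them with zip into the output.
import Mathlib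
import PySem

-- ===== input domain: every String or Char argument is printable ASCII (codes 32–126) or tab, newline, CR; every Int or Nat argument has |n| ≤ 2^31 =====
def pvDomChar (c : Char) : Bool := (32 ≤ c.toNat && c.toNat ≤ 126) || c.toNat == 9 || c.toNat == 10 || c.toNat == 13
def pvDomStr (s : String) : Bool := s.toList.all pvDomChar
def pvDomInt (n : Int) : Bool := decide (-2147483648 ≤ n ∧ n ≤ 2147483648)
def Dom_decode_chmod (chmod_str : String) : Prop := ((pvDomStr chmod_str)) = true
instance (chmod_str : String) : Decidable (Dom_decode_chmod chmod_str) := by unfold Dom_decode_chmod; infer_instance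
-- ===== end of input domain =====

-- B replaces A's single lookup-table pass by staged column-wise passes (filter digits once,
-- compute the r/w/x columns as three separate lists, interleave with zip); objective: alternative.

-- ===== PORT A =====
-- literal port of A: dict of the 8 octal digits, append-loop over the string, join.
-- (Python iterates a str as 1-char strings; those are Lean Chars, so the dict is keyed by Char.)
def pvPermDict : PySem.Dict Char String :=
  PySem.Dict.ofList [('0', "---"), ('1', "--x"), ('2', "-w-"), ('3', "-wx"),
                     ('4', "r--"), ('5', "r-x"), ('6', "rw-"), ('7', "rwx")]

def decode_chmod (chmod_str : String) : String :=
  let decoded : List String :=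
    chmod_str.toList.foldl
      (fun acc digit =>
        if pvPermDict.contains digit then acc ++ [pvPermDict.getD digit ""] else acc) []
  String.join decoded

-- ===== PORT B =====
-- Source B: kept = digits '0'..'7' converted via ord(c)-48; three column lists; join over zip.
def decode_chmod_alt (chmod_str : String) : String :=
  let kept : List Nat :=
    (chmod_str.toList.filter (fun c => decide ('0' ≤ c ∧ c ≤ '7'))).map (fun c => c.toNat - 48)
  let r := kept.map (fun n => if n ≥ 4 then 'r' else '-')
  let w := kept.map (fun n => if n % 4 ≥ 2 then 'w' else '-')
  let x := kept.map (fun n => if n % 2 = 1 then 'x' else '-')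
  String.join ((r.zip (w.zip x)).map (fun p => String.ofList [p.1, p.2.1, p.2.2]))

-- ===== PRECONDITION & SPEC =====
def Spec_decode_chmod (chmod_str : String) (out : String) : Prop := out = decode_chmod_alt chmod_str
instance (chmod_str : String) (out : String) : Decidable (Spec_decode_chmod chmod_str out) := by unfold Spec_decode_chmod; infer_instance

-- ===== CLAIM (what is proved, stated in full; the proofs are below) =====
def Claim_equal_decode_chmod : Prop := ∀ (chmod_str : String), Dom_decode_chmod chmod_str → Spec_decode_chmod chmod_str (decode_chmod chmod_str)

-- ===== LEMMAS AND PROOFS =====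

lemma pv_char_eq_of_toNat {c d : Char} (h : c.toNat = d.toNat) : c = d :=
  Char.ext (UInt32.toNat_inj.mp h)

-- a char in the range '0'..'7' is one of the 8 octal digit chars
lemma pv_range_cases (c : Char) (h : ('0' : Char) ≤ c ∧ c ≤ '7') :
    c = '0' ∨ c = '1' ∨ c = '2' ∨ c = '3' ∨ c = '4' ∨ c = '5' ∨ c = '6' ∨ c = '7' := by
  have hl : 48 ≤ c.toNat := UInt32.le_iff_toNat_le.mp (Char.le_def.mp h.1)
  have hr : c.toNat ≤ 55 := UInt32.le_iff_toNat_le.mp (Char.le_def.mp h.2)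
  have : c.toNat = 48 ∨ c.toNat = 49 ∨ c.toNat = 50 ∨ c.toNat = 51 ∨
         c.toNat = 52 ∨ c.toNat = 53 ∨ c.toNat = 54 ∨ c.toNat = 55 := by omega
  rcases this with h|h|h|h|h|h|h|h
  · exact Or.inl (pv_char_eq_of_toNat (d := '0') (by rw [h]; decide))
  · exact Or.inr (Or.inl (pv_char_eq_of_toNat (d := '1') (by rw [h]; decide)))
  · exact Or.inr (Or.inr (Or.inl (pv_char_eq_of_toNat (d := '2') (by rw [h]; decide))))
  · exact Or.inr (Or.inr (Or.inr (Or.inl (pv_char_eq_of_toNat (d := '3') (by rw [h]; decide)))))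
  · exact Or.inr (Or.inr (Or.inr (Or.inr (Or.inl (pv_char_eq_of_toNat (d := '4') (by rw [h]; decide))))))
  · exact Or.inr (Or.inr (Or.inr (Or.inr (Or.inr (Or.inl (pv_char_eq_of_toNat (d := '5') (by rw [h]; decide)))))))
  · exact Or.inr (Or.inr (Or.inr (Or.inr (Or.inr (Or.inr (Or.inl (pv_char_eq_of_toNat (d := '6') (by rw [h]; decide))))))))
  · exact Or.inr (Or.inr (Or.inr (Or.inr (Or.inr (Or.inr (Or.inr (pv_char_eq_of_toNat (d := '7') (by rw [h]; decide))))))))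

-- the two filters coincide: membership in A's dict ↔ '0' ≤ c ≤ '7'
lemma pv_contains_iff (c : Char) :
    pvPermDict.contains c = decide (('0' : Char) ≤ c ∧ c ≤ '7') := by
  by_cases h : ('0' : Char) ≤ c ∧ c ≤ '7'
  · rcases pv_range_cases c h with h'|h'|h'|h'|h'|h'|h'|h' <;> subst h' <;> decide
  · have hd : ∀ d : Char, ('0' : Char) ≤ d ∧ d ≤ '7' → c ≠ d := fun d hd e => h (e ▸ hd)
    have hc : pvPermDict.contains c = false := by
      simp [pvPermDict, PySem.Dict.contains, PySem.Dict.ofList, PySem.Dict.update,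
            PySem.Dict.insert, PySem.Dict.empty]
      exact ⟨fun e => hd '0' ⟨by decide, by decide⟩ e.symm,
             fun e => hd '1' ⟨by decide, by decide⟩ e.symm,
             fun e => hd '2' ⟨by decide, by decide⟩ e.symm,
             fun e => hd '3' ⟨by decide, by decide⟩ e.symm,
             fun e => hd '4' ⟨by decide, by decide⟩ e.symm,
             fun e => hd '5' ⟨by decide, by decide⟩ e.symm,
             fun e => hd '6' ⟨by decide, by decide⟩ e.symm,
             fun e => hd '7' ⟨by decide, by decide⟩ e.symm⟩
    simp [hc, h]

-- on an in-range digit, A's table entry is B's column-computed triple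
lemma pv_entry_eq (c : Char) (h : ('0' : Char) ≤ c ∧ c ≤ '7') :
    pvPermDict.getD c "" =
      String.ofList [if c.toNat - 48 ≥ 4 then 'r' else '-',
                     if (c.toNat - 48) % 4 ≥ 2 then 'w' else '-',
                     if (c.toNat - 48) % 2 = 1 then 'x' else '-'] := by
  rcases pv_range_cases c h with h'|h'|h'|h'|h'|h'|h'|h' <;> subst h' <;> decide

-- ===== VERDICT (by name: the statement is the Claim_ definition above) =====
theorem decode_chmod_spec : Claim_equal_decode_chmod := by
  intro s _
  show decode_chmod s = decode_chmod_alt s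
  unfold decode_chmod decode_chmod_alt
  rw [PySem.List.foldl_append_if (p := fun c => pvPermDict.contains c)
        (f := fun c => pvPermDict.getD c "")]
  simp only [List.nil_append]
  have hf : s.toList.filter (fun c => pvPermDict.contains c) =
      s.toList.filter (fun c => decide (('0' : Char) ≤ c ∧ c ≤ '7')) := by
    apply List.filter_congr; intro c _; exact pv_contains_iff c
  rw [hf]
  -- collapse B's zip of three maps over the same list into one map
  rw [List.zip_map', List.zip_map', List.map_map, List.map_map]
  apply congrArg String.join
  apply List.map_congr_left
  intro c hc
  exact pv_entry_eq c (of_decide_eq_true (List.mem_filter.mp hc).2)
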